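-- pv_equiv track=rewrite | github.com/kyon317/Leetcode_daily_questions | Daily_challenges/DynamicProgramming/minimumMountainRemovals.py | minimumMountainRemovals
-- ===== SOURCE A (Python) =====
-- from bisect import bisect_left
-- from typing import List
--
-- def minimumMountainRemovals(nums: List[int]) -> int:
--     n = len(nums)
--     suf = [0] * n
--     g = [] # suffix
--     for i in range(n - 1, -1, -1):
--         x = nums[i]
--         idx = bisect_left(g, x)
--         if idx == len(g):
--             g.append(x)
--         else:
--             g[idx] = x
--         suf[i] = idx + 1
--     f = [] # prefix
--     res = 0 # res = max(pre[i] + suf[i] - 1)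
--     for i,x in enumerate(nums):
--         x = nums[i]
--         idx = bisect_left(f, x)
--         if idx == len(f):
--             f.append(x)
--         else:
--             f[idx] = x
--         pre = idx + 1
--         if pre > 1 and suf[i] > 1: # need at least one element on both sides
--             res = max(res, pre + suf[i] - 1)
--     return n - res
-- ===== SOURCE B (Python) =====
-- def minimumMountainRemovals(nums):
--     n = len(nums)
--
--     def lis_dp(seq):
--         # classic quadratic DP: dp value = length of the longest strictly
--         # increasing subsequence ending at each element
--         dp = []
--         for x in seq:
--             best = 0
--             for y, d in dp:
--                 if y < x and d > best:
--                     best = d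
--             dp.append((x, best + 1))
--         return [d for _, d in dp]
--
--     lis = lis_dp(nums)
--     lds = lis_dp(nums[::-1])[::-1]
--     res = 0
--     for a, b in zip(lis, lds):
--         if a > 1 and b > 1:
--             res = max(res, a + b - 1)
--     return n - res
-- ===== Notes on version B (the rewrite author's own statement) =====
-- stated objective: alternative
-- what changed: Replaced the two patience-sorting/bisect passes with the classic quadratic DP that computes, by nested loops, the longest strictly increasing run ending at each index and (via the reversed list) the longest strictly decreasing run starting at it, then combines them with the same both-sides>1 guard.
import Mathlib
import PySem

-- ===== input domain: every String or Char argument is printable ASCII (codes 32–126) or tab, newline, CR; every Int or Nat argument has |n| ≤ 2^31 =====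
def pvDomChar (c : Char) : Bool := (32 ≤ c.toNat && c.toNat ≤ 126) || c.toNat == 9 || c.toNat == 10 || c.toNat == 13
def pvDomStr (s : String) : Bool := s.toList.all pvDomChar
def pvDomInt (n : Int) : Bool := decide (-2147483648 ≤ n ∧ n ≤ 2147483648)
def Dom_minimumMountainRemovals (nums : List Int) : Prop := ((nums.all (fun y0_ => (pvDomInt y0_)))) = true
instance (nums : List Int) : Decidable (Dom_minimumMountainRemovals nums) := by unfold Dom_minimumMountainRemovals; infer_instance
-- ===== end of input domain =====

-- B replaces A's two patience-sorting/bisect passes with the classic quadratic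
-- LIS/LDS dynamic programming (objective: alternative algorithm, not faster).

-- ===== PORT A =====
-- bisect_left g x on a SORTED list returns the first index idx with x ≤ g[idx]
-- (len(g) if none); the lists g and f of A are sorted at every step (proved
-- below), where this linear form is exact.
def pvBisectLeft (g : List Int) (x : Int) : Nat := g.findIdx (fun y => x ≤ y)

-- the shared body 'idx = bisect_left(..); if idx == len: append else assign; idx+1'
def pvPatStep (g : List Int) (x : Int) : List Int × Int :=
  let idx := pvBisectLeft g x
  (if idx = g.length then g ++ [x] else g.set idx x, (idx : Int) + 1)

-- body of 'for i in range(n-1, -1, -1): x = nums[i]; …; suf[i] = idx + 1'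
def pvSufStep (nums : List Int) (st : List Int × List Int) (i : Int) : List Int × List Int :=
  let x := PySem.List.pyGetD nums i 0
  let r := pvPatStep st.1 x
  (r.1, PySem.List.pySetD st.2 i r.2)

-- body of 'for i, x in enumerate(nums): x = nums[i] (the same element); …'
def pvMainStep (suf : List Int) (st : List Int × Int) (p : Int × Int) : List Int × Int :=
  let x := p.2
  let r := pvPatStep st.1 x
  let pre := r.2
  let s := PySem.List.pyGetD suf p.1 0
  (r.1, if pre > 1 ∧ s > 1 then max st.2 (pre + s - 1) else st.2)

def minimumMountainRemovals (nums : List Int) : Int :=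
  let n := nums.length
  let sufSt := (PySem.List.pyRange ((n : Int) - 1) (-1) (-1)).foldl (pvSufStep nums)
      ([], List.replicate n (0 : Int))
  let fin := (PySem.List.enumerate nums 0).foldl (pvMainStep sufSt.2) ([], (0 : Int))
  (n : Int) - fin.2

-- ===== PORT B =====
-- inner loop 'best = 0; for y, d in dp: if y < x and d > best: best = d'
def pvDpNext (dp : List (Int × Int)) (x : Int) : Int :=
  dp.foldl (fun best p => if p.1 < x ∧ p.2 > best then p.2 else best) 0

-- loop body 'dp.append((x, best + 1))'
def pvDpStep (dp : List (Int × Int)) (x : Int) : List (Int × Int) :=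
  dp ++ [(x, pvDpNext dp x + 1)]

def pvLisDP (seq : List Int) : List Int :=
  (seq.foldl pvDpStep []).map (fun p => p.2)

-- 'if a > 1 and b > 1: res = max(res, a + b - 1)'
def pvResStep (res : Int) (p : Int × Int) : Int :=
  if p.1 > 1 ∧ p.2 > 1 then max res (p.1 + p.2 - 1) else res

def minimumMountainRemovals_alt (nums : List Int) : Int :=
  let n := nums.length
  let lis := pvLisDP nums
  let lds := (pvLisDP nums.reverse).reverse   -- seq[::-1] is reverse
  let res := (lis.zip lds).foldl pvResStep 0
  (n : Int) - res

-- ===== PRECONDITION & SPEC =====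
def Spec_minimumMountainRemovals (nums : List Int) (out : Int) : Prop := out = minimumMountainRemovals_alt nums
instance (nums : List Int) (out : Int) : Decidable (Spec_minimumMountainRemovals nums out) := by unfold Spec_minimumMountainRemovals; infer_instance

-- ===== CLAIM (what is proved, stated in full; the proofs are below) =====
def Claim_equal_minimumMountainRemovals : Prop := ∀ (nums : List Int), Dom_minimumMountainRemovals nums → Spec_minimumMountainRemovals nums (minimumMountainRemovals nums)

-- ===== LEMMAS AND PROOFS =====

-- the per-element DP values produced while the dp list grows
def pvDpOut : List (Int × Int) → List Int → List Int
  | _, [] => []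
  | dp, x :: t => (pvDpNext dp x + 1) :: pvDpOut (pvDpStep dp x) t

-- the per-element values idx+1 produced by the patience pass
def pvPatOut : List Int → List Int → List Int
  | _, [] => []
  | g, x :: t => (pvPatStep g x).2 :: pvPatOut (pvPatStep g x).1 t

-- final patience state
def pvPatFin (g : List Int) (p : List Int) : List Int :=
  p.foldl (fun g x => (pvPatStep g x).1) g

-- the patience invariant relating the pile-tops g to the DP pairs dp
def pvInv (dp : List (Int × Int)) (g : List Int) : Prop :=
  (∀ j k, j < k → k < g.length → g.getD j 0 < g.getD k 0) ∧
  (∀ pr ∈ dp, pr.2 ≤ (g.length : Int)) ∧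
  (∀ k, k < g.length → ∃ pr ∈ dp, pr.2 = (k : Int) + 1 ∧ pr.1 = g.getD k 0) ∧
  (∀ k, k < g.length → ∀ pr ∈ dp, (k : Int) + 1 ≤ pr.2 → g.getD k 0 ≤ pr.1)

theorem pvFoldMax (x : Int) (dp : List (Int × Int)) : ∀ (b : Int),
    b ≤ dp.foldl (fun best p => if p.1 < x ∧ p.2 > best then p.2 else best) b ∧
    (dp.foldl (fun best p => if p.1 < x ∧ p.2 > best then p.2 else best) b = b ∨
      ∃ pr ∈ dp, pr.1 < x ∧ pr.2 = dp.foldl (fun best p => if p.1 < x ∧ p.2 > best then p.2 else best) b) ∧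
    (∀ pr ∈ dp, pr.1 < x → pr.2 ≤ dp.foldl (fun best p => if p.1 < x ∧ p.2 > best then p.2 else best) b) := by
  induction dp with
  | nil => intro b; simp
  | cons hd t ih =>
    intro b
    simp only [List.foldl_cons]
    by_cases h : hd.1 < x ∧ hd.2 > b
    · simp only [if_pos h]
      obtain ⟨h1, h2, h3⟩ := ih hd.2
      refine ⟨by omega, ?_, ?_⟩
      · rcases h2 with h2 | ⟨pr, hm, hlt, he⟩
        · exact Or.inr ⟨hd, by simp, h.1, h2.symm ▸ rfl⟩
        · exact Or.inr ⟨pr, by simp [hm], hlt, he⟩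
      · intro pr hm hlt
        rcases List.mem_cons.1 hm with rfl | hm
        · exact h1
        · exact h3 pr hm hlt
    · simp only [if_neg h]
      obtain ⟨h1, h2, h3⟩ := ih b
      refine ⟨h1, ?_, ?_⟩
      · rcases h2 with h2 | ⟨pr, hm, hlt, he⟩
        · exact Or.inl h2
        · exact Or.inr ⟨pr, by simp [hm], hlt, he⟩
      · intro pr hm hlt
        rcases List.mem_cons.1 hm with rfl | hm
        · have := h1; rw [Classical.not_and_iff_not_or_not] at h; omega
        · exact h3 pr hm hlt

theorem pvInv_nil : pvInv [] [] := by
  refine ⟨?_, ?_, ?_, ?_⟩ <;> simp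

-- the key step: under the invariant, the patience value idx+1 IS the DP value,
-- and the invariant is preserved
theorem pvPat_step (dp : List (Int × Int)) (g : List Int) (x : Int) (h : pvInv dp g) :
    (pvPatStep g x).2 = pvDpNext dp x + 1 ∧ pvInv (pvDpStep dp x) (pvPatStep g x).1 := by
  obtain ⟨hs, hb, hex, hall⟩ := h
  set idx := pvBisectLeft g x with hidx
  have hle : idx ≤ g.length := List.findIdx_le_length
  have hlt : ∀ k, k < idx → g.getD k 0 < x := by
    intro k hk
    have hkl : k < g.length := lt_of_lt_of_le hk hle
    have := List.not_of_lt_findIdx (p := fun y => decide (x ≤ y)) (xs := g) (i := k) hk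
    simp only [decide_eq_false_iff_not, not_le] at this
    rwa [List.getD_eq_getElem g 0 hkl]
  have hge : idx < g.length → x ≤ g.getD idx 0 := by
    intro hkl
    have := List.findIdx_getElem (p := fun y => decide (x ≤ y)) (xs := g) (w := hkl)
    simp only [decide_eq_true_eq] at this
    rwa [List.getD_eq_getElem g 0 hkl]
  -- the DP value equals idx
  have hm := pvFoldMax x dp 0
  set m := dp.foldl (fun best p => if p.1 < x ∧ p.2 > best then p.2 else best) 0 with hmdef
  obtain ⟨hm0, hm1, hm2⟩ := hm
  have hmidx : m = (idx : Int) := by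
    have hub : m ≤ (idx : Int) := by
      by_contra hc
      rcases hm1 with hm1 | ⟨pr, hmem, hlt', he⟩
      · omega
      · -- pr.2 = m ≥ idx+1, so idx < g.length; then g[idx] ≤ pr.1 < x, contradiction
        have h1 : (idx : Int) + 1 ≤ pr.2 := by omega
        have h2 : pr.2 ≤ (g.length : Int) := hb pr hmem
        have h3 : idx < g.length := by exact_mod_cast (by omega : (idx : Int) < (g.length : Int))
        have h4 := hall idx h3 pr hmem h1
        have h5 := hge h3
        omega
    have hlb : (idx : Int) ≤ m := by
      rcases Nat.eq_zero_or_pos idx with h0 | h0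
      · omega
      · have hk : idx - 1 < g.length := by omega
        obtain ⟨pr, hmem, he2, he1⟩ := hex (idx - 1) hk
        have : g.getD (idx - 1) 0 < x := hlt _ (by omega)
        have := hm2 pr hmem (by omega)
        have : ((idx - 1 : Nat) : Int) = (idx : Int) - 1 := by omega
        omega
    omega
  have hv : (pvPatStep g x).2 = pvDpNext dp x + 1 := by
    simp only [pvPatStep, pvDpNext, ← hmdef, ← hidx, hmidx]
  refine ⟨hv, ?_⟩
  -- invariant preservation
  have hdp' : pvDpStep dp x = dp ++ [(x, (idx : Int) + 1)] := by
    simp only [pvDpStep, pvDpNext, ← hmdef, hmidx]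
  rw [hdp']
  by_cases hcase : idx = g.length
  · -- append case
    have hg' : (pvPatStep g x).1 = g ++ [x] := by
      simp only [pvPatStep, ← hidx, if_pos hcase]
    rw [hg']
    have hlen : (g ++ [x]).length = g.length + 1 := by simp
    have hget : ∀ k, k < g.length + 1 → (g ++ [x]).getD k 0 = if k < g.length then g.getD k 0 else x := by
      intro k hk
      by_cases hkl : k < g.length
      · rw [List.getD_eq_getElem _ 0 (by simp; omega), List.getElem_append_left hkl,
          if_pos hkl, List.getD_eq_getElem _ 0 hkl]
      · have hk' : k = g.length := by omega
        rw [if_neg hkl, hk', List.getD_eq_getElem _ 0 (by simp)]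
        simp
    refine ⟨?_, ?_, ?_, ?_⟩
    · intro j k hjk hk
      rw [hlen] at hk
      rw [hget j (by omega), hget k hk]
      by_cases hkl : k < g.length
      · rw [if_pos (by omega), if_pos hkl]; exact hs j k hjk hkl
      · rw [if_neg hkl, if_pos (by omega)]
        exact hlt j (by omega)
    · intro pr hmem
      rw [hlen]
      rcases List.mem_append.1 hmem with hmem | hmem
      · have := hb pr hmem; push_cast; omega
      · simp at hmem; rw [hmem]; push_cast; omega
    · intro k hk
      rw [hlen] at hk
      by_cases hkl : k < g.length
      · obtain ⟨pr, hmem, h1, h2⟩ := hex k hkl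
        exact ⟨pr, List.mem_append_left _ hmem, h1, by rw [hget k hk, if_pos hkl]; exact h2⟩
      · have hk' : k = g.length := by omega
        refine ⟨(x, (idx : Int) + 1), List.mem_append_right _ (by simp), by simp [hk', hcase], ?_⟩
        rw [hget k hk, if_neg hkl]
    · intro k hk pr hmem hpr
      rw [hlen] at hk
      rcases List.mem_append.1 hmem with hmem | hmem
      · have h2 := hb pr hmem
        have hkl : k < g.length := by
          by_contra hc
          have : k = g.length := by omega
          omega
        rw [hget k hk, if_pos hkl]
        exact hall k hkl pr hmem hpr
      · simp at hmem
        rw [hmem] at hpr ⊢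
        simp only at hpr ⊢
        rw [hget k hk]
        by_cases hkl : k < g.length
        · rw [if_pos hkl]
          have : k < idx := by omega
          have := hlt k this
          omega
        · rw [if_neg hkl]
  · have hidxlt : idx < g.length := by omega
    have hg' : (pvPatStep g x).1 = g.set idx x := by
      simp only [pvPatStep, ← hidx, if_neg hcase]
    rw [hg']
    have hlen : (g.set idx x).length = g.length := by simp
    have hget : ∀ k, k < g.length → (g.set idx x).getD k 0 = if k = idx then x else g.getD k 0 := by
      intro k hk
      rw [List.getD_eq_getElem _ 0 (by simp [hk]), List.getElem_set]
      by_cases hke : idx = k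
      · simp [hke]
      · rw [if_neg hke, if_neg (fun h => hke h.symm), List.getD_eq_getElem _ 0 hk]
    have hxle : x ≤ g.getD idx 0 := hge hidxlt
    refine ⟨?_, ?_, ?_, ?_⟩
    · intro j k hjk hk
      rw [hlen] at hk
      rw [hget j (by omega), hget k hk]
      by_cases hje : j = idx <;> by_cases hke : k = idx
      · omega
      · rw [if_pos hje, if_neg hke]
        have := hs idx k (by omega) hk
        omega
      · rw [if_neg hje, if_pos hke]
        have h1 := hlt j (by omega)
        omega
      · rw [if_neg hje, if_neg hke]; exact hs j k hjk hk
    · intro pr hmem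
      rw [hlen]
      rcases List.mem_append.1 hmem with hmem | hmem
      · exact hb pr hmem
      · simp at hmem; rw [hmem]; push_cast; omega
    · intro k hk
      rw [hlen] at hk
      by_cases hke : k = idx
      · refine ⟨(x, (idx : Int) + 1), List.mem_append_right _ (by simp), by simp [hke], ?_⟩
        rw [hget k hk, if_pos hke]
      · obtain ⟨pr, hmem, h1, h2⟩ := hex k hk
        exact ⟨pr, List.mem_append_left _ hmem, h1, by rw [hget k hk, if_neg hke]; exact h2⟩
    · intro k hk pr hmem hpr
      rw [hlen] at hk
      rw [hget k hk]
      rcases List.mem_append.1 hmem with hmem | hmem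
      · by_cases hke : k = idx
        · rw [if_pos hke]
          have := hall idx hidxlt pr hmem (by rw [hke] at hpr; exact hpr)
          omega
        · rw [if_neg hke]
          exact hall k hk pr hmem hpr
      · simp at hmem
        rw [hmem] at hpr ⊢
        simp only at hpr ⊢
        by_cases hke : k = idx
        · rw [if_pos hke]
        · rw [if_neg hke]
          have : k < idx := by omega
          have := hlt k this
          omega

theorem pvPatOut_eq_dpOut (p : List Int) : ∀ (dp : List (Int × Int)) (g : List Int),
    pvInv dp g → pvPatOut g p = pvDpOut dp p := by
  induction p with
  | nil => intro dp g _; rfl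
  | cons x t ih =>
    intro dp g h
    obtain ⟨h1, h2⟩ := pvPat_step dp g x h
    simp only [pvPatOut, pvDpOut, h1]
    rw [ih (pvDpStep dp x) (pvPatStep g x).1 h2]

theorem pvLisDP_aux (p : List Int) : ∀ (dp : List (Int × Int)),
    (p.foldl pvDpStep dp).map (fun pr => pr.2) = dp.map (fun pr => pr.2) ++ pvDpOut dp p := by
  induction p with
  | nil => intro dp; simp [pvDpOut]
  | cons x t ih =>
    intro dp
    simp only [List.foldl_cons, pvDpOut]
    rw [ih (pvDpStep dp x)]
    simp [pvDpStep]

theorem pvLisDP_eq (p : List Int) : pvLisDP p = pvPatOut [] p := by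
  rw [pvLisDP, pvLisDP_aux, pvPatOut_eq_dpOut p [] [] pvInv_nil]
  simp

theorem pvPatOut_length (p : List Int) : ∀ g, (pvPatOut g p).length = p.length := by
  induction p with
  | nil => intro g; rfl
  | cons x t ih => intro g; simp [pvPatOut, ih]

-- helper: dropping at a just-set position
theorem pvDropSet {α : Type} (l : List α) (m : Nat) (v : α) (h : m < l.length) :
    (l.set m v).drop m = v :: l.drop (m + 1) := by
  rw [List.drop_eq_getElem_cons (by simp [h] : m < (l.set m v).length)]
  rw [List.getElem_set_self, List.drop_set, if_pos (by omega)]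

theorem pvTakeSuccRev (l : List Int) (m : Nat) (h : m < l.length) :
    (l.take (m + 1)).reverse = l.getD m 0 :: (l.take m).reverse := by
  rw [List.take_add_one, List.getElem?_eq_getElem h, List.getD_eq_getElem l 0 h]
  simp

-- the suffix loop writes the patience outputs of the reversed prefix
theorem pvSufLoop (nums : List Int) : ∀ (m : Nat) (g suf : List Int),
    m ≤ nums.length → suf.length = nums.length →
    (PySem.List.pyRange ((m : Int) - 1) (-1) (-1)).foldl (pvSufStep nums) (g, suf) =
      (pvPatFin g ((nums.take m).reverse),
        (pvPatOut g ((nums.take m).reverse)).reverse ++ suf.drop m) := by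
  intro m
  induction m with
  | zero =>
    intro g suf _ _
    rw [PySem.List.pyRange_neg_one_eq_nil (by omega)]
    simp [pvPatFin, pvPatOut]
  | succ m ih =>
    intro g suf hm hl
    have hmn : m < nums.length := by omega
    have harith : ((m : Int) + 1 - 1) = (m : Int) := by omega
    rw [show (((m + 1 : Nat) : Int) - 1) = (m : Int) by push_cast; omega]
    rw [PySem.List.pyRange_neg_one_cons (by omega)]
    simp only [List.foldl_cons]
    have hstep : pvSufStep nums (g, suf) (m : Int) =
        ((pvPatStep g (nums.getD m 0)).1, suf.set m (pvPatStep g (nums.getD m 0)).2) := by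
      simp [pvSufStep]
    rw [hstep, ih _ _ (by omega) (by simp [hl])]
    rw [pvTakeSuccRev nums m hmn]
    simp only [pvPatFin, List.foldl_cons, pvPatOut]
    rw [pvDropSet suf m _ (by omega)]
    simp [List.append_assoc]

-- the main loop folds pvResStep over the zip of patience outputs and suf
theorem pvMainLoop (suf : List Int) : ∀ (p : List Int) (i0 : Nat) (f : List Int) (res : Int),
    i0 + p.length ≤ suf.length →
    ((PySem.List.enumerate p (i0 : Int)).foldl (pvMainStep suf) (f, res)).2 =
      ((pvPatOut f p).zip (suf.drop i0)).foldl pvResStep res := by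
  intro p
  induction p with
  | nil => intro i0 f res _; simp [PySem.List.enumerate, pvPatOut]
  | cons x t ih =>
    intro i0 f res hlen
    have hi0 : i0 < suf.length := by simp at hlen; omega
    rw [PySem.List.enumerate_cons]
    simp only [List.foldl_cons]
    have hstep : pvMainStep suf (f, res) ((i0 : Int), x) =
        ((pvPatStep f x).1, pvResStep res ((pvPatStep f x).2, suf.getD i0 0)) := by
      simp [pvMainStep, pvResStep]
    rw [hstep]
    rw [show ((i0 : Int) + 1) = ((i0 + 1 : Nat) : Int) by push_cast; ring]
    rw [ih (i0 + 1) _ _ (by simp at hlen ⊢; omega)]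
    rw [List.drop_eq_getElem_cons hi0, ← List.getD_eq_getElem suf 0 hi0]
    simp [pvPatOut]

theorem pvSufEq (nums : List Int) :
    ((PySem.List.pyRange ((nums.length : Int) - 1) (-1) (-1)).foldl (pvSufStep nums)
      ([], List.replicate nums.length (0 : Int))).2 = (pvPatOut [] nums.reverse).reverse := by
  rw [pvSufLoop nums nums.length [] (List.replicate nums.length (0 : Int)) (le_refl _) (by simp)]
  simp

-- ===== VERDICT (by name: the statement is the Claim_ definition above) =====
theorem minimumMountainRemovals_spec : Claim_equal_minimumMountainRemovals := by
  intro nums _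
  show minimumMountainRemovals nums = minimumMountainRemovals_alt nums
  simp only [minimumMountainRemovals, minimumMountainRemovals_alt]
  rw [pvSufEq nums]
  have h2 := pvMainLoop ((pvPatOut [] nums.reverse).reverse) nums 0 [] 0
    (by simp [pvPatOut_length])
  simp only [Nat.cast_zero, List.drop_zero] at h2
  rw [h2, pvLisDP_eq nums, pvLisDP_eq nums.reverse]
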